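-- pv_equiv track=rewrite | github.com/brainbreaks/HiRepliMap | 1_Annot_features.py | identify_IZs
-- ===== SOURCE A (Python) =====
-- def identify_IZs(clusters):
--     IZs = []
--     for i in range(1,len(clusters)-1):
--         if clusters[i-1] > clusters[i]:
--             start=i
--             while i < len(clusters)-1 and clusters[i] == clusters[i + 1]:
--                 i+=1
--             if i < len(clusters)-1 and clusters[i+1] > clusters[i]:
--                 for j in range(start,i+1):
--                     IZs.append(j)
--
--     return IZs
-- ===== SOURCE B (Python) =====
-- def identify_IZs(clusters):
--     n = len(clusters)
--     def is_valley(i):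
--         v = clusters[i]
--         l = i
--         while l > 0 and clusters[l - 1] == v:
--             l -= 1
--         r = i
--         while r < n - 1 and clusters[r + 1] == v:
--             r += 1
--         return l > 0 and r < n - 1 and clusters[l - 1] > v and clusters[r + 1] > v
--     return [i for i in range(1, n - 1) if is_valley(i)]
-- ===== Notes on version B (the rewrite author's own statement) =====
-- stated objective: alternative
-- what changed: A walks forward from each descending plateau start with stateful start/end tracking and emits whole index blocks; B instead filters range(1, n-1) by an independent per-index predicate (the maximal equal plateau around i has strictly greater neighbours on both sides).
import Mathlib
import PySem

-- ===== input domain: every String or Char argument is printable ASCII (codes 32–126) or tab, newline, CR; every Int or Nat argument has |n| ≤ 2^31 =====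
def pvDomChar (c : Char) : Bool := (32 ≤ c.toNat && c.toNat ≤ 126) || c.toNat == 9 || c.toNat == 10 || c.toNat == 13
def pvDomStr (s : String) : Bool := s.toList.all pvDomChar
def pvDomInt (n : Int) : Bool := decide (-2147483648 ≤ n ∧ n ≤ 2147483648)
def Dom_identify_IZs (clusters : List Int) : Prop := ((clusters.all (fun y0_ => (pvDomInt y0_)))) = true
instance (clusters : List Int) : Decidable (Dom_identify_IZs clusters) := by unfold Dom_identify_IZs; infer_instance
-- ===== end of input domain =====

-- B replaces A's stateful block emission (inner forward walk from each descending
-- plateau start) by a per-index membership test: index i is kept iff the maximal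
-- equal plateau around i has strictly greater neighbours on both sides (objective:
-- simpler/alternative decomposition; not claimed faster).

-- ===== PORT A =====
-- inner 'while i < len(clusters)-1 and clusters[i] == clusters[i+1]: i += 1' (fuel-bounded while)
def pvWalkA (c : List Int) (i : Int) : Nat → Int
  | 0 => i
  | f+1 =>
    if i < (c.length : Int) - 1 ∧ PySem.List.pyGetD c i 0 = PySem.List.pyGetD c (i+1) 0 then
      pvWalkA c (i+1) f
    else i

-- body of A's 'for i in range(1, len(clusters)-1)' loop
def pvBodyA (c : List Int) (IZs : List Int) (i : Int) : List Int :=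
  if PySem.List.pyGetD c (i-1) 0 > PySem.List.pyGetD c i 0 then
    let start := i
    let e := pvWalkA c i c.length
    if e < (c.length : Int) - 1 ∧ PySem.List.pyGetD c (e+1) 0 > PySem.List.pyGetD c e 0 then
      (PySem.List.pyRange start (e+1) 1).foldl (fun acc j => acc ++ [j]) IZs
    else IZs
  else IZs

def identify_IZs (clusters : List Int) : List Int :=
  (PySem.List.pyRange 1 ((clusters.length : Int) - 1) 1).foldl (pvBodyA clusters) []

-- ===== PORT B =====
-- 'while l > 0 and clusters[l-1] == v: l -= 1' (fuel-bounded while)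
def pvWalkL (c : List Int) (v l : Int) : Nat → Int
  | 0 => l
  | f+1 =>
    if l > 0 ∧ PySem.List.pyGetD c (l-1) 0 = v then pvWalkL c v (l-1) f else l

-- 'while r < n - 1 and clusters[r+1] == v: r += 1' (fuel-bounded while)
def pvWalkR (c : List Int) (v r : Int) : Nat → Int
  | 0 => r
  | f+1 =>
    if r < (c.length : Int) - 1 ∧ PySem.List.pyGetD c (r+1) 0 = v then pvWalkR c v (r+1) f else r

def pvIsValley (c : List Int) (i : Int) : Bool :=
  let v := PySem.List.pyGetD c i 0
  let l := pvWalkL c v i c.length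
  let r := pvWalkR c v i c.length
  decide (l > 0) && decide (r < (c.length : Int) - 1) &&
    decide (PySem.List.pyGetD c (l-1) 0 > v) && decide (PySem.List.pyGetD c (r+1) 0 > v)

def identify_IZs_alt (clusters : List Int) : List Int :=
  (PySem.List.pyRange 1 ((clusters.length : Int) - 1) 1).filter (pvIsValley clusters)

-- ===== PRECONDITION & SPEC =====
def Spec_identify_IZs (clusters : List Int) (out : List Int) : Prop := out = identify_IZs_alt clusters
instance (clusters : List Int) (out : List Int) : Decidable (Spec_identify_IZs clusters out) := by unfold Spec_identify_IZs; infer_instance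

-- ===== CLAIM (what is proved, stated in full; the proofs are below) =====
def Claim_equal_identify_IZs : Prop := ∀ (clusters : List Int), Dom_identify_IZs clusters → Spec_identify_IZs clusters (identify_IZs clusters)

-- ===== LEMMAS AND PROOFS =====

-- abbreviation for element access used throughout the proofs
def gv (c : List Int) (j : Int) : Int := PySem.List.pyGetD c j 0

theorem gv_def (c : List Int) (j : Int) : PySem.List.pyGetD c j 0 = gv c j := rfl

-- e is where a rightward walk from s, chaining equalities c[j] = c[j+1], stops
def PlateauEndR (c : List Int) (s e : Int) : Prop :=
  s ≤ e ∧ e ≤ (c.length : Int) - 1 ∧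
  (∀ j, s ≤ j → j < e → gv c j = gv c (j+1)) ∧
  ¬(e < (c.length : Int) - 1 ∧ gv c e = gv c (e+1))

-- e is where a rightward walk from s, comparing against the fixed value v, stops
def PlateauEndRv (c : List Int) (v s e : Int) : Prop :=
  s ≤ e ∧ e ≤ (c.length : Int) - 1 ∧
  (∀ j, s < j → j ≤ e → gv c j = v) ∧
  ¬(e < (c.length : Int) - 1 ∧ gv c (e+1) = v)

-- l is where a leftward walk from j, comparing against the fixed value v, stops
def PlateauEndLv (c : List Int) (v l j : Int) : Prop :=
  l ≤ j ∧ 0 ≤ l ∧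
  (∀ m, l ≤ m → m < j → gv c m = v) ∧
  ¬(l > 0 ∧ gv c (l-1) = v)

theorem plateau_all {c : List Int} {s e : Int} (h : PlateauEndR c s e)
    {j : Int} (h1 : s ≤ j) (h2 : j ≤ e) : gv c j = gv c s := by
  obtain ⟨hse, hbnd, hch, hstop⟩ := h
  clear hstop hbnd hse
  induction j, h1 using Int.le_induction with
  | base => rfl
  | succ n hn ih =>
    have h1 : gv c n = gv c (n+1) := hch n hn (by omega)
    rw [← h1]
    exact ih (by omega)


theorem endRv_unique {c : List Int} {v s e e' : Int}
    (h : PlateauEndRv c v s e) (h' : PlateauEndRv c v s e') : e = e' := by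
  obtain ⟨hse, hbnd, hch, hstop⟩ := h
  obtain ⟨hse2, hbnd2, hch2, hstop2⟩ := h'
  rcases lt_trichotomy e e' with hlt | heq | hgt
  · exact absurd ⟨by omega, hch2 (e+1) (by omega) (by omega)⟩ hstop
  · exact heq
  · exact absurd ⟨by omega, hch (e'+1) (by omega) (by omega)⟩ hstop2


theorem endLv_unique {c : List Int} {v l l' j : Int}
    (h : PlateauEndLv c v l j) (h' : PlateauEndLv c v l' j) : l = l' := by
  obtain ⟨hlj, h0, hch, hstop⟩ := h
  obtain ⟨hlj2, h02, hch2, hstop2⟩ := h'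
  rcases lt_trichotomy l l' with hlt | heq | hgt
  · exact absurd ⟨by omega, hch (l'-1) (by omega) (by omega)⟩ hstop2
  · exact heq
  · exact absurd ⟨by omega, hch2 (l-1) (by omega) (by omega)⟩ hstop


theorem walkA_spec (c : List Int) (i : Int) (fuel : Nat)
    (hin : i ≤ (c.length : Int) - 1)
    (hf : ((c.length : Int) - 1 - i).toNat ≤ fuel) :
    PlateauEndR c i (pvWalkA c i fuel) := by
  induction fuel generalizing i with
  | zero =>
    rw [pvWalkA]
    refine ⟨le_refl i, hin, fun j h1 h2 => absurd h2 (by omega), fun h => ?_⟩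
    omega
  | succ f ih =>
    rw [pvWalkA]
    split_ifs with hcond
    · obtain ⟨ha, hb, hch, hstop⟩ := ih (i+1) (by omega) (by omega)
      refine ⟨by omega, hb, fun j hj1 hj2 => ?_, hstop⟩
      by_cases hji : j = i
      · subst hji; exact hcond.2
      · exact hch j (by omega) hj2
    · exact ⟨le_refl i, hin, fun j h1 h2 => absurd h2 (by omega), fun h => hcond ⟨h.1, h.2⟩⟩


theorem walkR_spec (c : List Int) (v r : Int) (fuel : Nat)
    (hin : r ≤ (c.length : Int) - 1)
    (hf : ((c.length : Int) - 1 - r).toNat ≤ fuel) :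
    PlateauEndRv c v r (pvWalkR c v r fuel) := by
  induction fuel generalizing r with
  | zero =>
    rw [pvWalkR]
    refine ⟨le_refl r, hin, fun j h1 h2 => absurd h2 (by omega), fun h => ?_⟩
    omega
  | succ f ih =>
    rw [pvWalkR]
    split_ifs with hcond
    · obtain ⟨ha, hb, hch, hstop⟩ := ih (r+1) (by omega) (by omega)
      refine ⟨by omega, hb, fun j hj1 hj2 => ?_, hstop⟩
      by_cases hjr : j = r + 1
      · subst hjr; exact hcond.2
      · exact hch j (by omega) hj2
    · exact ⟨le_refl r, hin, fun j h1 h2 => absurd h2 (by omega), fun h => hcond ⟨h.1, h.2⟩⟩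


theorem walkL_spec (c : List Int) (v j : Int) (fuel : Nat)
    (hin : 0 ≤ j) (hf : j.toNat ≤ fuel) :
    PlateauEndLv c v (pvWalkL c v j fuel) j := by
  induction fuel generalizing j with
  | zero =>
    rw [pvWalkL]
    have hj0 : j = 0 := by omega
    subst hj0
    exact ⟨le_refl 0, le_refl 0, fun m h1 h2 => absurd h2 (by omega), fun h => by omega⟩
  | succ f ih =>
    rw [pvWalkL]
    split_ifs with hcond
    · obtain ⟨ha, hb, hch, hstop⟩ := ih (j-1) (by omega) (by omega)
      refine ⟨by omega, hb, fun m hm1 hm2 => ?_, hstop⟩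
      by_cases hmj : m = j - 1
      · subst hmj; exact hcond.2
      · exact hch m hm1 (by omega)
    · exact ⟨le_refl j, hin, fun m h1 h2 => absurd h2 (by omega), fun h => hcond ⟨h.1, h.2⟩⟩


-- on a plateau [s,e] found by A's walk, B's rightward walk from any j in it stops at e
theorem walkR_on_plateau {c : List Int} {s e j : Int} (hp : PlateauEndR c s e)
    (h0 : 0 ≤ s) (h1 : s ≤ j) (h2 : j ≤ e) :
    pvWalkR c (gv c s) j c.length = e := by
  obtain ⟨hse, hbnd, hch, hstop⟩ := hp
  refine endRv_unique (walkR_spec c (gv c s) j c.length (by omega) (by omega)) ?_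
  refine ⟨h2, hbnd, fun k hk1 hk2 => plateau_all ⟨hse, hbnd, hch, hstop⟩ (by omega) hk2, fun h => ?_⟩
  exact hstop ⟨h.1, (plateau_all ⟨hse, hbnd, hch, hstop⟩ hse (le_refl e)).trans h.2.symm⟩

-- on a plateau [s,e] with a genuine left boundary, B's leftward walk from any j in it stops at s
theorem walkL_on_plateau {c : List Int} {s e j : Int} (hp : PlateauEndR c s e)
    (hs1 : 1 ≤ s) (hne : gv c (s-1) ≠ gv c s)
    (h1 : s ≤ j) (h2 : j ≤ e) :
    pvWalkL c (gv c s) j c.length = s := by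
  obtain ⟨hse, hbnd, hch, hstop⟩ := hp
  refine endLv_unique (walkL_spec c (gv c s) j c.length (by omega) (by omega)) ?_
  refine ⟨h1, by omega, fun m hm1 hm2 => plateau_all ⟨hse, hbnd, hch, hstop⟩ hm1 (by omega), fun h => ?_⟩
  have : s - 1 < s := by omega
  exact hne h.2

-- value of B's predicate on a plateau [s,e] with a genuine left boundary
theorem isValley_on_plateau {c : List Int} {s e j : Int} (hp : PlateauEndR c s e)
    (hs1 : 1 ≤ s) (hne : gv c (s-1) ≠ gv c s)
    (h1 : s ≤ j) (h2 : j ≤ e) :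
    pvIsValley c j =
      (decide (s > 0) && decide (e < (c.length : Int) - 1) &&
       decide (gv c (s-1) > gv c s) && decide (gv c (e+1) > gv c s)) := by
  have hvj : gv c j = gv c s := plateau_all hp h1 h2
  have hs0 : (0:Int) ≤ s := by omega
  simp only [pvIsValley, gv_def]
  simp only [hvj, walkL_on_plateau hp hs1 hne h1 h2, walkR_on_plateau hp hs0 h1 h2]

theorem foldl_no_op {α β : Type} (f : β → α → β) (l : List α) (a : β)
    (h : ∀ x ∈ l, ∀ b, f b x = b) : l.foldl f a = a := by
  induction l generalizing a with
  | nil => rfl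
  | cons x xs ih =>
    rw [List.foldl_cons, h x (by simp)]
    exact ih a (fun y hy b => h y (List.mem_cons_of_mem x hy) b)


-- B's predicate is constant along a plateau step
theorem pvIsValley_succ (c : List Int) (i : Int) (h1 : 1 ≤ i)
    (hlt : i < (c.length : Int) - 1) (heq : gv c i = gv c (i+1)) :
    pvIsValley c (i+1) = pvIsValley c i := by
  have hr12 : pvWalkR c (gv c i) (i+1) c.length = pvWalkR c (gv c i) i c.length := by
    obtain ⟨ha, hb, hch, hstop⟩ := walkR_spec c (gv c i) i c.length (by omega) (by omega)
    have hi1 : i + 1 ≤ pvWalkR c (gv c i) i c.length := by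
      rcases eq_or_lt_of_le ha with h | h
      · exact absurd ⟨h ▸ hlt, h ▸ heq.symm⟩ hstop
      · omega
    exact endRv_unique (walkR_spec c (gv c i) (i+1) c.length (by omega) (by omega))
      ⟨hi1, hb, fun k hk1 hk2 => hch k (by omega) hk2, hstop⟩
  have hl12 : pvWalkL c (gv c i) (i+1) c.length = pvWalkL c (gv c i) i c.length := by
    obtain ⟨ha, hb, hch, hstop⟩ := walkL_spec c (gv c i) (i+1) c.length (by omega) (by omega)
    have hi1 : pvWalkL c (gv c i) (i+1) c.length ≤ i := by
      rcases eq_or_lt_of_le ha with h | h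
      · exfalso
        apply hstop
        refine ⟨by omega, ?_⟩
        rw [h, show i + 1 - 1 = i from by ring]
      · omega
    exact (endLv_unique (walkL_spec c (gv c i) i c.length (by omega) (by omega))
      ⟨hi1, hb, fun m hm1 hm2 => hch m hm1 (by omega), hstop⟩).symm
  simp only [pvIsValley, gv_def]
  simp only [← heq, hr12, hl12]
  rfl

-- the invariant carried by the main induction: if i continues the plateau of i-1, B rejects i
def pvPlateauInv (c : List Int) (i : Int) : Prop :=
  i < (c.length : Int) - 1 → gv c (i-1) = gv c i → pvIsValley c i = false

theorem pvInv_one (c : List Int) : pvPlateauInv c 1 := by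
  intro hlt heq
  have hL : pvWalkL c (gv c 1) 1 c.length = 0 := by
    refine endLv_unique (walkL_spec c (gv c 1) 1 c.length (by omega) (by omega)) ?_
    refine ⟨by omega, le_refl 0, fun m hm1 hm2 => ?_, fun h => by omega⟩
    have hm : m = 0 := by omega
    subst hm; exact heq
  simp only [pvIsValley, gv_def, hL]
  rfl

theorem main_loop (c : List Int) (fuel : Nat) (i : Int) (acc : List Int)
    (h1 : 1 ≤ i)
    (hf : ((c.length : Int) - 1 - i).toNat ≤ fuel)
    (hInv : pvPlateauInv c i) :
    (PySem.List.pyRange i ((c.length : Int) - 1) 1).foldl (pvBodyA c) acc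
      = acc ++ (PySem.List.pyRange i ((c.length : Int) - 1) 1).filter (pvIsValley c) := by
  induction fuel generalizing i acc with
  | zero =>
    rw [PySem.List.pyRange_one_eq_nil (by omega)]
    simp
  | succ f IH =>
    by_cases hlt : i < (c.length : Int) - 1
    · have step : pvIsValley c i = false → ¬(gv c (i-1) > gv c i) →
          (PySem.List.pyRange i ((c.length : Int) - 1) 1).foldl (pvBodyA c) acc
            = acc ++ (PySem.List.pyRange i ((c.length : Int) - 1) 1).filter (pvIsValley c) := by
        intro hPi hng
        rw [PySem.List.pyRange_one_cons (by omega), List.foldl_cons, List.filter_cons]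
        have hbody : pvBodyA c acc i = acc := by
          simp only [pvBodyA, gv_def]
          rw [if_neg hng]
        have hInv' : pvPlateauInv c (i+1) := by
          intro h1' heq'
          rw [show i + 1 - 1 = i from by ring] at heq'
          rw [pvIsValley_succ c i (by omega) (by omega) heq']
          exact hPi
        rw [hbody, hPi, IH (i+1) acc (by omega) (by omega) hInv']
        simp
      rcases lt_trichotomy (gv c (i-1)) (gv c i) with hLt | hEq | hGt
      · have hpe : PlateauEndR c i (pvWalkA c i c.length) :=
          walkA_spec c i c.length (by omega) (by omega)
        have hPi : pvIsValley c i = false := by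
          rw [isValley_on_plateau hpe (by omega) (by omega) (le_refl i) hpe.1]
          have hng : ¬ (gv c (i-1) > gv c i) := by omega
          simp [hng]
        exact step hPi (by omega)
      · exact step (hInv hlt hEq) (by omega)
      · have hne : gv c (i-1) ≠ gv c i := by omega
        set e := pvWalkA c i c.length with he_def
        have hpe : PlateauEndR c i e := walkA_spec c i c.length (by omega) (by omega)
        have hie : i ≤ e := hpe.1
        have hen : e ≤ (c.length : Int) - 1 := hpe.2.1
        have hnoop : ∀ (m : Int) (acc' : List Int), m ≤ e + 1 →
            (PySem.List.pyRange (i+1) m 1).foldl (pvBodyA c) acc' = acc' := by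
          intro m acc' hm
          apply foldl_no_op
          intro x hx b
          have hx' := PySem.List.mem_pyRange_one.1 hx
          have hxx : gv c (x-1) = gv c x := by
            have h := hpe.2.2.1 (x-1) (by omega) (by omega)
            rwa [show x - 1 + 1 = x from by ring] at h
          simp only [pvBodyA, gv_def]
          rw [if_neg (by omega)]
        have hplat : gv c e = gv c i := plateau_all hpe hie (le_refl e)
        by_cases heN : e < (c.length : Int) - 1
        · have hstop' : gv c e ≠ gv c (e+1) := fun h => hpe.2.2.2 ⟨heN, h⟩
          rw [PySem.List.pyRange_one_append i (e+1) ((c.length : Int) - 1) (by omega) (by omega)]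
          rw [List.foldl_append, List.filter_append]
          have hcons : PySem.List.pyRange i (e+1) 1 = i :: PySem.List.pyRange (i+1) (e+1) 1 :=
            PySem.List.pyRange_one_cons (by omega)
          have hInv' : pvPlateauInv c (e+1) := by
            intro _ heq'
            rw [show e + 1 - 1 = e from by ring] at heq'
            exact absurd heq' hstop'
          by_cases hv : gv c (e+1) > gv c e
          · have hbody : pvBodyA c acc i = acc ++ PySem.List.pyRange i (e+1) 1 := by
              simp only [pvBodyA, gv_def]
              rw [if_pos hGt, ← he_def, if_pos ⟨heN, hv⟩, PySem.List.foldl_append_singleton]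
            have hfilt : (PySem.List.pyRange i (e+1) 1).filter (pvIsValley c)
                = PySem.List.pyRange i (e+1) 1 := by
              apply List.filter_eq_self.2
              intro j hj
              have hj' := PySem.List.mem_pyRange_one.1 hj
              rw [isValley_on_plateau hpe (by omega) hne (by omega) (by omega)]
              have h0 : (0:Int) < i := by omega
              have h2' : gv c (e+1) > gv c i := by omega
              simp [h0, heN, hGt, h2']
            have hfold1 : (PySem.List.pyRange i (e+1) 1).foldl (pvBodyA c) acc
                = acc ++ PySem.List.pyRange i (e+1) 1 := by
              rw [hcons, List.foldl_cons, hbody, hnoop (e+1) _ (le_refl _), hcons]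
            rw [hfold1, hfilt, IH (e+1) (acc ++ PySem.List.pyRange i (e+1) 1) (by omega) (by omega) hInv']
            rw [List.append_assoc]
          · have hbody : pvBodyA c acc i = acc := by
              simp only [pvBodyA, gv_def]
              rw [if_pos hGt, ← he_def, if_neg (fun h => hv h.2)]
            have hfilt : (PySem.List.pyRange i (e+1) 1).filter (pvIsValley c) = [] := by
              apply List.filter_eq_nil_iff.2
              intro j hj
              have hj' := PySem.List.mem_pyRange_one.1 hj
              rw [isValley_on_plateau hpe (by omega) hne (by omega) (by omega)]
              have h2' : ¬ (gv c (e+1) > gv c i) := by omega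
              simp [h2']
            have hfold1 : (PySem.List.pyRange i (e+1) 1).foldl (pvBodyA c) acc = acc := by
              rw [hcons, List.foldl_cons, hbody, hnoop (e+1) _ (le_refl _)]
            rw [hfold1, hfilt, IH (e+1) acc (by omega) (by omega) hInv']
            simp
        · rw [PySem.List.pyRange_one_cons (show i < (c.length : Int) - 1 from hlt)]
          rw [List.foldl_cons, List.filter_cons]
          have hbody : pvBodyA c acc i = acc := by
            simp only [pvBodyA, gv_def]
            rw [if_pos hGt, ← he_def, if_neg (fun h => heN h.1)]
          have hPi : pvIsValley c i = false := by
            rw [isValley_on_plateau hpe (by omega) hne (le_refl i) hie]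
            simp [heN]
          have hfilt : (PySem.List.pyRange (i+1) ((c.length : Int) - 1) 1).filter (pvIsValley c)
              = [] := by
            apply List.filter_eq_nil_iff.2
            intro j hj
            have hj' := PySem.List.mem_pyRange_one.1 hj
            rw [isValley_on_plateau hpe (by omega) hne (by omega) (by omega)]
            simp [heN]
          rw [hbody, hnoop ((c.length : Int) - 1) acc (by omega), hPi, hfilt]
          simp
    · rw [PySem.List.pyRange_one_eq_nil (by omega)]
      simp

-- ===== VERDICT (by name: the statement is the Claim_ definition above) =====
theorem identify_IZs_spec : Claim_equal_identify_IZs := by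
  intro c _
  show identify_IZs c = identify_IZs_alt c
  unfold identify_IZs identify_IZs_alt
  rw [main_loop c c.length 1 [] (by omega) (by omega) (pvInv_one c)]
  simp
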